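-- pv_equiv track=rewrite | github.com/idanzur/aoc-2021 | 17/script.py | is_valid_y
-- ===== SOURCE A (Python) =====
-- def is_valid_y(v0, target_y):
--     start = 0
--     while True:
--         start += v0
--         v0 -= 1
--         if start < target_y[0]:
--             return False
--         if target_y[0] <= start <= target_y[1]:
--             return True
-- ===== SOURCE B (Python) =====
-- def is_valid_y(v0, target_y):
--     low, high = target_y[0], target_y[1]
--
--     def pos(k):
--         # y-position after k steps from velocity v0
--         return k * v0 - k * (k - 1) // 2
--
--     if pos(1) <= high:
--         return low <= pos(1)
--     # pos(1) > high: positions are above the band until they fall back through it;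
--     # binary-search the first step k whose position is <= high (the set of such k
--     # is upward closed because pos is concave and starts above high)
--     lo, hi = 1, 2 * (abs(v0) + abs(high) + 1)   # pos(hi) <= high is guaranteed
--     while lo + 1 < hi:
--         mid = (lo + hi) // 2
--         if pos(mid) <= high:
--             hi = mid
--         else:
--             lo = mid
--     return low <= pos(hi)
-- ===== Notes on version B (the rewrite author's own statement) =====
-- stated objective: faster
-- what changed: replaces the step-by-step trajectory simulation with a closed-form position formula plus a binary search for the first step whose position falls to or below the band's top, O(log) instead of O(v0 + sqrt(|low|)) steps
-- outside the precondition, e.g. on is_valid_y(0, (1,)): A returns False, B raises IndexError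
import Mathlib
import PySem

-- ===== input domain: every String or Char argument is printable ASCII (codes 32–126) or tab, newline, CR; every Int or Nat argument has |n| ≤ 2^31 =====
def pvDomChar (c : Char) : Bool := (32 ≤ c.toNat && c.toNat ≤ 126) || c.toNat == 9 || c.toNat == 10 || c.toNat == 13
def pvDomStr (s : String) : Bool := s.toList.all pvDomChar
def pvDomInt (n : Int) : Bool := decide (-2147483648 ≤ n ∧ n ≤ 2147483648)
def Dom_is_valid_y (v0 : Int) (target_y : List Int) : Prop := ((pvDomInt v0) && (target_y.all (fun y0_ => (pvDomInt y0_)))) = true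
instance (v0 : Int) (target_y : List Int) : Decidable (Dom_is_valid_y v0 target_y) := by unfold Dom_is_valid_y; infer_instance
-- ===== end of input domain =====

-- B replaces A's step-by-step simulation by a closed-form position formula and a
-- binary search for the first step at or below the band's top (return value only).

-- ===== PORT A =====
-- A's 'while True' loop over state (start, v0), with a fuel counter that is
-- proved sufficient below (once the position exceeds `high`, the quantity
-- 2*start + v0^2 + 2*v0 shrinks by 1 per iteration; fuel = that bound + 1).
def isvLoop (low high : Int) : Int → Int → Nat → Bool
  | _, _, 0 => false
  | start, v0, n+1 =>
      if start + v0 < low then false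
      else if low ≤ start + v0 ∧ start + v0 ≤ high then true
      else isvLoop low high (start + v0) (v0 - 1) n

def is_valid_y (v0 : Int) (target_y : List Int) : Bool :=
  match PySem.List.pyGet? target_y 0, PySem.List.pyGet? target_y 1 with
  | some low, some high => isvLoop low high 0 v0 ((v0*v0 + 2*v0 - 2*high + 2).toNat + 1)
  | _, _ => false

-- ===== PORT B =====
-- pos(k) from Source B: position after k steps, closed form
def posB (v0 k : Int) : Int := k * v0 - PySem.Int.floordiv (k*(k-1)) 2

-- the binary-search 'while lo + 1 < hi' loop of Source B; the interval shrinks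
-- every iteration, so fuel (hi - lo).toNat is sufficient (proved below)
def bsB (high v0 : Int) : Int → Int → Nat → Int
  | _, hi, 0 => hi
  | lo, hi, n+1 =>
      if lo + 1 < hi then
        if posB v0 (PySem.Int.floordiv (lo+hi) 2) ≤ high then
          bsB high v0 lo (PySem.Int.floordiv (lo+hi) 2) n
        else
          bsB high v0 (PySem.Int.floordiv (lo+hi) 2) hi n
      else hi

def is_valid_y_alt (v0 : Int) (target_y : List Int) : Bool :=
  match PySem.List.pyGet? target_y 0 with
  | none => false
  | some low =>
    match PySem.List.pyGet? target_y 1 with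
    | none => false
    | some high =>
      if posB v0 1 ≤ high then decide (low ≤ posB v0 1)
      else decide (low ≤ posB v0 (bsB high v0 1 (2 * (|v0| + |high| + 1)) (2 * (|v0| + |high| + 1) - 1).toNat))

-- ===== PRECONDITION & SPEC =====
-- Pre_ excludes target lists of length < 2, on which A raises IndexError except
-- when a length-1 target is overshot at once (A then returns False; B raises).
def Pre_is_valid_y (v0 : Int) (target_y : List Int) : Prop := 2 ≤ target_y.length
instance (v0 : Int) (target_y : List Int) : Decidable (Pre_is_valid_y v0 target_y) := by unfold Pre_is_valid_y; infer_instance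
def pvWitness_is_valid_y : Int × List Int := (5, [-10, -5])

def Spec_is_valid_y (v0 : Int) (target_y : List Int) (out : Bool) : Prop := out = is_valid_y_alt v0 target_y
instance (v0 : Int) (target_y : List Int) (out : Bool) : Decidable (Spec_is_valid_y v0 target_y out) := by unfold Spec_is_valid_y; infer_instance

-- ===== CLAIM (what is proved, stated in full; the proofs are below) =====
def Claim_equal_is_valid_y : Prop := ∀ (v0 : Int) (target_y : List Int), Dom_is_valid_y v0 target_y → Pre_is_valid_y v0 target_y → Spec_is_valid_y v0 target_y (is_valid_y v0 target_y)

-- ===== LEMMAS AND PROOFS =====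

-- the trajectory as a recursive function (proof device; mirrors A's state updates)
def traj (start w : Int) : Nat → Int
  | 0 => start
  | m+1 => traj (start + w) (w - 1) m

theorem traj_one (start w : Int) : traj start w 1 = start + w := rfl

theorem traj_succ (start w : Int) (m : Nat) :
    traj start w (m+1) = traj (start + w) (w - 1) m := rfl

theorem traj_step (start w : Int) (m : Nat) :
    traj start w (m+1) = traj start w m + (w - m) := by
  induction m generalizing start w with
  | zero => simp [traj]
  | succ m ih =>
      rw [traj_succ, ih, traj_succ]
      push_cast; ring

theorem traj_closed (start w : Int) (m : Nat) :
    2 * traj start w m = 2*start + 2*m*w - m*(m-1) := by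
  induction m with
  | zero => simp [traj]
  | succ m ih =>
      rw [traj_step, mul_add, ih]
      push_cast; ring

-- there is always a step whose position is ≤ high
theorem hit_ex_aux (high : Int) : ∀ n : Nat, ∀ start w : Int,
    (2*start + w*w + 2*w - 2*high + 2).toNat ≤ n →
    ∃ m, 1 ≤ m ∧ traj start w m ≤ high := by
  intro n
  induction n with
  | zero =>
      intro start w h
      refine ⟨1, le_refl _, ?_⟩
      rw [traj_one]
      have e : 2*start + w*w + 2*w - 2*high + 2 = 2*(start+w-high) + w*w + 2 := by ring
      have hp : 0 ≤ w*w := mul_self_nonneg w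
      omega
  | succ n ih =>
      intro start w h
      by_cases hc : start + w ≤ high
      · exact ⟨1, le_refl _, by rwa [traj_one]⟩
      · obtain ⟨m, hm1, hm2⟩ := ih (start+w) (w-1) (by
          have e : 2*start + w*w + 2*w - 2*high + 2
              = (2*(start+w) + (w-1)*(w-1) + 2*(w-1) - 2*high + 2) + 1 := by ring
          have e2 : 2*(start+w) + (w-1)*(w-1) + 2*(w-1) - 2*high + 2
              = 2*(start+w-high) + w*w + 1 := by ring
          have hp : 0 ≤ w*w := mul_self_nonneg w
          omega)
        exact ⟨m+1, by omega, by rwa [traj_succ]⟩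

theorem hit_ex (high start w : Int) : ∃ m, 1 ≤ m ∧ traj start w m ≤ high :=
  hit_ex_aux high _ start w (le_refl _)

-- first step whose position is ≤ high
def Nfirst (high start w : Int) : Nat := Nat.find (hit_ex high start w)

theorem Nfirst_pos (high start w : Int) : 1 ≤ Nfirst high start w :=
  (Nat.find_spec (hit_ex high start w)).1

theorem Nfirst_le_high (high start w : Int) : traj start w (Nfirst high start w) ≤ high :=
  (Nat.find_spec (hit_ex high start w)).2

theorem Nfirst_le (high start w : Int) {m : Nat} (h1 : 1 ≤ m) (h2 : traj start w m ≤ high) :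
    Nfirst high start w ≤ m :=
  Nat.find_le ⟨h1, h2⟩

-- A's loop computes: is the first position ≤ high also ≥ low?  (fuel-adequacy included)
theorem loop_eq (low high : Int) : ∀ n : Nat, ∀ start w : Int,
    (2*start + w*w + 2*w - 2*high + 2).toNat < n →
    isvLoop low high start w n = decide (low ≤ traj start w (Nfirst high start w)) := by
  intro n
  induction n with
  | zero => intro start w h; omega
  | succ n ih =>
      intro start w hfuel
      simp only [isvLoop]
      by_cases hA : start + w < low
      · rw [if_pos hA]
        by_cases hsw : start + w ≤ high
        · have hN : Nfirst high start w = 1 :=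
            le_antisymm (Nfirst_le high start w le_rfl (by rwa [traj_one])) (Nfirst_pos _ _ _)
          rw [hN, traj_one]
          simp
          omega
        · have hh := Nfirst_le_high high start w
          simp
          omega
      · rw [if_neg hA]
        by_cases hB : low ≤ start + w ∧ start + w ≤ high
        · rw [if_pos hB]
          have hN : Nfirst high start w = 1 :=
            le_antisymm (Nfirst_le high start w le_rfl (by rw [traj_one]; exact hB.2)) (Nfirst_pos _ _ _)
          rw [hN, traj_one]
          simp
          exact hB.1
        · rw [if_neg hB]
          have hlow : low ≤ start + w := by omega
          have hhigh : high < start + w := by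
            by_contra hc
            exact hB ⟨hlow, by omega⟩
          have hN : Nfirst high start w = Nfirst high (start+w) (w-1) + 1 := by
            apply le_antisymm
            · exact Nfirst_le high start w (by omega)
                (by rw [traj_succ]; exact Nfirst_le_high _ _ _)
            · by_contra hc
              push Not at hc
              have hp := Nfirst_pos high start w
              have hh := Nfirst_le_high high start w
              rcases Nat.eq_or_lt_of_le hp with he | he
              · rw [← he, traj_one] at hh; omega
              · have hm : Nfirst high start w = (Nfirst high start w - 1) + 1 := by omega
                rw [hm, traj_succ] at hh
                have := Nfirst_le high (start+w) (w-1) (m := Nfirst high start w - 1) (by omega) hh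
                omega
          have hfuel' : (2*(start+w) + (w-1)*(w-1) + 2*(w-1) - 2*high + 2).toNat < n := by
            have e : 2*start + w*w + 2*w - 2*high + 2
                = (2*(start+w) + (w-1)*(w-1) + 2*(w-1) - 2*high + 2) + 1 := by ring
            have e2 : 2*(start+w) + (w-1)*(w-1) + 2*(w-1) - 2*high + 2
                = 2*(start+w-high) + w*w + 1 := by ring
            rw [e2] at e
            have hp : 0 ≤ w*w := mul_self_nonneg w
            omega
          rw [hN, traj_succ, ih (start+w) (w-1) hfuel']

-- upward closure: once above-high positions are behind us, they stay ≤ high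
theorem traj_ge_one (start w : Int) : ∀ j : Nat, 1 ≤ j →
    (∀ i : Nat, 1 ≤ i → i < j → (i:Int) ≤ w) → traj start w 1 ≤ traj start w j := by
  intro j
  induction j with
  | zero => omega
  | succ j ih =>
      intro _ hall
      rcases Nat.eq_or_lt_of_le (show 1 ≤ j + 1 by omega) with h1 | h1
      · rw [← h1]
      · have hj : 1 ≤ j := by omega
        have step := traj_step start w j
        have hw : (j:Int) ≤ w := hall j hj (by omega)
        have := ih hj (fun i hi hij => hall i hi (by omega))
        omega

theorem traj_le_of_le (start w : Int) (j : Nat) (hw : w < (j:Int)) :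
    ∀ k, j ≤ k → traj start w k ≤ traj start w j := by
  intro k
  induction k with
  | zero => intro h; interval_cases j; rfl
  | succ k ih =>
      intro h
      rcases Nat.eq_or_lt_of_le h with h1 | h1
      · rw [h1]
      · have hk : j ≤ k := by omega
        have step := traj_step start w k
        have hkw : w - (k:Int) ≤ 0 := by
          have : (j:Int) ≤ (k:Int) := by exact_mod_cast hk
          omega
        have := ih hk
        omega

theorem traj_closure (start w high : Int) (h1 : high < traj start w 1)
    (j : Nat) (hj : 1 ≤ j) (hjh : traj start w j ≤ high) :
    ∀ k, j ≤ k → traj start w k ≤ high := by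
  intro k hk
  have hlt : traj start w j < traj start w 1 := by omega
  -- some increment before j was negative, hence w < j
  have hwj : w < (j:Int) := by
    by_contra hc
    push Not at hc
    have : traj start w 1 ≤ traj start w j := by
      refine traj_ge_one start w j hj (fun i hi hij => ?_)
      have : (i:Int) < (j:Int) := by exact_mod_cast hij
      omega
    omega
  have := traj_le_of_le start w j hwj k hk
  omega

-- bridges between B's closed form and the trajectory
theorem two_posB (v0 k : Int) : 2 * posB v0 k = 2*k*v0 - k*(k-1) := by
  have hev : Even (k*(k-1)) := by
    have h := Int.even_mul_succ_self (k-1)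
    have : (k-1) * (k-1+1) = k*(k-1) := by ring
    rwa [this] at h
  have hfd : PySem.Int.floordiv (k*(k-1)) 2 = (k*(k-1)) / 2 :=
    PySem.Int.floordiv_eq_ediv_of_pos (by norm_num)
  have h2 : 2 * ((k*(k-1)) / 2) = k*(k-1) := Int.two_mul_ediv_two_of_even hev
  unfold posB
  rw [hfd]
  rw [mul_sub, h2]
  ring

theorem posB_eq (v0 : Int) (m : Nat) : posB v0 (m:Int) = traj 0 v0 m := by
  have h1 := two_posB v0 (m:Int)
  have h2 := traj_closed 0 v0 m
  omega

theorem posB_big (v0 high : Int) : posB v0 (2 * (|v0| + |high| + 1)) ≤ high := by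
  have h2 := two_posB v0 (2 * (|v0| + |high| + 1))
  have hv : v0 ≤ |v0| := le_abs_self v0
  have hh : -|high| ≤ high := neg_abs_le high
  have hv0 : 0 ≤ |v0| := abs_nonneg v0
  have hh0 : 0 ≤ |high| := abs_nonneg high
  nlinarith [mul_le_mul_of_nonneg_left hv (show (0:Int) ≤ 2 * (2 * (|v0| + |high| + 1)) by omega),
             mul_nonneg hv0 hh0, mul_self_nonneg (|v0| - |high|), mul_self_nonneg (|v0| + |high|)]

-- binary-search correctness (the fuel (hi-lo).toNat is sufficient)
theorem bs_correct (high v0 : Int) : ∀ n : Nat, ∀ lo hi : Int, (hi - lo).toNat ≤ n →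
    1 ≤ lo → lo + 1 ≤ hi → high < posB v0 lo → posB v0 hi ≤ high →
    lo < bsB high v0 lo hi n ∧ bsB high v0 lo hi n ≤ hi ∧
      posB v0 (bsB high v0 lo hi n) ≤ high ∧ high < posB v0 (bsB high v0 lo hi n - 1) := by
  intro n
  induction n with
  | zero => intro lo hi hn h1 h2 h3 h4; exfalso; omega
  | succ n ih =>
      intro lo hi hn h1 h2 h3 h4
      simp only [bsB]
      have hmid : PySem.Int.floordiv (lo+hi) 2 = (lo+hi)/2 :=
        PySem.Int.floordiv_eq_ediv_of_pos (by norm_num)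
      rw [hmid]
      by_cases hc : lo + 1 < hi
      · rw [if_pos hc]
        have hmlo : lo < (lo+hi)/2 := by omega
        have hmhi : (lo+hi)/2 < hi := by omega
        by_cases hm : posB v0 ((lo+hi)/2) ≤ high
        · rw [if_pos hm]
          obtain ⟨g1, g2, g3, g4⟩ := ih lo ((lo+hi)/2) (by omega) h1 (by omega) h3 hm
          exact ⟨g1, by omega, g3, g4⟩
        · rw [if_neg hm]
          obtain ⟨g1, g2, g3, g4⟩ := ih ((lo+hi)/2) hi (by omega) (by omega) (by omega)
            (by omega) h4
          exact ⟨by omega, g2, g3, g4⟩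
      · rw [if_neg hc]
        have he : hi = lo + 1 := by omega
        refine ⟨by omega, le_rfl, h4, ?_⟩
        rw [he]
        simpa using h3

theorem main_eq (low high v0 : Int) :
    isvLoop low high 0 v0 ((v0*v0 + 2*v0 - 2*high + 2).toNat + 1) =
      (if posB v0 1 ≤ high then decide (low ≤ posB v0 1)
       else decide (low ≤ posB v0 (bsB high v0 1 (2 * (|v0| + |high| + 1))
                                      ((2 * (|v0| + |high| + 1) - 1).toNat)))) := by
  rw [loop_eq low high ((v0*v0 + 2*v0 - 2*high + 2).toNat + 1) 0 v0 (by omega)]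
  have h1 : posB v0 1 = traj 0 v0 1 := by exact_mod_cast posB_eq v0 1
  by_cases hb : posB v0 1 ≤ high
  · rw [if_pos hb]
    have hN : Nfirst high 0 v0 = 1 :=
      le_antisymm (Nfirst_le _ _ _ le_rfl (by rw [← h1]; exact hb)) (Nfirst_pos _ _ _)
    rw [hN, ← h1]
  · rw [if_neg hb]
    have hHb : posB v0 (2 * (|v0| + |high| + 1)) ≤ high := posB_big v0 high
    have hv0 : 0 ≤ |v0| := abs_nonneg v0
    have hh0 : 0 ≤ |high| := abs_nonneg high
    obtain ⟨hr1, hr2, hr3, hr4⟩ := bs_correct high v0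
      ((2 * (|v0| + |high| + 1) - 1).toNat) 1 (2 * (|v0| + |high| + 1))
      (by omega) le_rfl (by omega) (by omega) hHb
    set r := bsB high v0 1 (2 * (|v0| + |high| + 1)) ((2 * (|v0| + |high| + 1) - 1).toNat) with hrdef
    have hrn : ((r.toNat : Nat) : Int) = r := by omega
    have hposr : posB v0 r = traj 0 v0 r.toNat := by rw [← hrn]; exact posB_eq v0 r.toNat
    have hposr1 : posB v0 (r-1) = traj 0 v0 (r-1).toNat := by
      have : ((((r-1).toNat : Nat)) : Int) = r - 1 := by omega
      rw [← this]; exact posB_eq v0 (r-1).toNat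
    have hNle : Nfirst high 0 v0 ≤ r.toNat :=
      Nfirst_le _ _ _ (by omega) (by rw [← hposr]; exact hr3)
    have hNge : r.toNat ≤ Nfirst high 0 v0 := by
      by_contra hcc
      push Not at hcc
      have hrt : (r-1).toNat = r.toNat - 1 := by omega
      have hcl := traj_closure 0 v0 high (by omega)
        (Nfirst high 0 v0) (Nfirst_pos _ _ _) (Nfirst_le_high _ _ _) ((r-1).toNat) (by omega)
      rw [← hposr1] at hcl
      omega
    have hfin : Nfirst high 0 v0 = r.toNat := by omega
    rw [hfin, ← hposr]

-- ===== VERDICT (by name: the statement is the Claim_ definition above) =====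
theorem is_valid_y_spec : Claim_equal_is_valid_y := by
  intro v0 target_y _ hpre
  unfold Spec_is_valid_y
  unfold Pre_is_valid_y at hpre
  match target_y, hpre with
  | a :: b :: rest, _ =>
    show is_valid_y v0 (a :: b :: rest) = is_valid_y_alt v0 (a :: b :: rest)
    have h0 : PySem.List.pyGet? (a :: b :: rest) 0 = some a := by
      simp [PySem.List.pyGet?_zero_cons]
    have h1 : PySem.List.pyGet? (a :: b :: rest) 1 = some b := by
      simp [PySem.List.pyGet?, PySem.List.pyIdx?]
    unfold is_valid_y is_valid_y_alt
    rw [h0, h1]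
    exact main_eq a b v0
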